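-- pv_equiv track=rewrite | github.com/seongjaee/algorithm-study | Codes/Programmers/둘만의암호.py | solution
-- ===== SOURCE A (Python) =====
-- def solution(s, skip, index):
--     answer = ""
--     remains = []
--
--     for i in range(26):
--         char = chr(i + ord("a"))
--         if char not in skip:
--             remains.append(char)
--
--     n = len(remains)
--     index_dict = {char: idx for idx, char in enumerate(remains)}
--     for char in s:
--         i = (index_dict[char] + index) % n
--         answer += remains[i]
--
--     return answer
-- ===== SOURCE B (Python) =====
-- def solution(s, skip, index):
--     def allowed(i):
--         return chr(i + 97) not in skip
--
--     n = sum(1 for i in range(26) if allowed(i))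
--
--     def rank(c):
--         # rank of c among the allowed letters, by scanning the alphabet
--         r = 0
--         for i in range(26):
--             if allowed(i):
--                 if chr(i + 97) == c:
--                     return r
--                 r += 1
--         raise KeyError(c)  # c is not a decodable character
--
--     def unrank(r):
--         # the allowed letter whose rank is r
--         for i in range(26):
--             if allowed(i):
--                 if r == 0:
--                     return chr(i + 97)
--                 r -= 1
--
--     return ''.join(unrank((rank(c) + index) % n) for c in s)
-- ===== Notes on version B (the rewrite author's own statement) =====
-- stated objective: alternative
-- what changed: B builds no tables at all: instead of A's remains list plus char->index dict, it decodes each character by scanning the alphabet for its rank among non-skipped letters, shifting that rank mod their count, and scanning again for the letter with the shifted rank (rank/unrank).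
import Mathlib
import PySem

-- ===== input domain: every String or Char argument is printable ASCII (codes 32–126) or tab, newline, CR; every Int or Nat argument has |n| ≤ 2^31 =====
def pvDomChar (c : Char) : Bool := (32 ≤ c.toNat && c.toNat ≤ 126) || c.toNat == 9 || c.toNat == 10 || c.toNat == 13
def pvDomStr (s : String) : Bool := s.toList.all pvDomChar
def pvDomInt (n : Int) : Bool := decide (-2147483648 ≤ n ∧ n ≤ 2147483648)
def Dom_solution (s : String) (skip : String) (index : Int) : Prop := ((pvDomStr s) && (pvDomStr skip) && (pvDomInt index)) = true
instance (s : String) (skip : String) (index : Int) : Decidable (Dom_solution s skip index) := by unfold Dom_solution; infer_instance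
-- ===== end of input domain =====

-- B drops A's materialised list+dict tables entirely: per character it scans the alphabet for
-- the character's rank among allowed letters, shifts the rank mod their count, and scans again
-- for the letter of that rank. Objective: alternative (table-free; same practical cost).

-- ===== PORT A =====
def solution (s : String) (skip : String) (index : Int) : String :=
  let remains : List Char :=
    (PySem.List.pyRange 0 26 1).foldl (fun acc i =>
      let char := Char.ofNat (i + 97).toNat
      if !(skip.toList.contains char) then acc ++ [char] else acc) []
  let n : Int := remains.length
  let indexDict : PySem.Dict Char Int :=
    (PySem.List.enumerate remains).foldl (fun d p => d.insert p.2 p.1) PySem.Dict.empty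
  let answer : List Char := s.toList.foldl (fun acc char =>
      let i := PySem.Int.mod (indexDict.getD char 0 + index) n
      acc ++ [PySem.List.pyGetD remains i 'a']) []
  String.ofList answer

-- ===== PORT B =====
-- allowed(i): chr(i + 97) not in skip
def pvAllowed (skip : String) (i : Int) : Bool :=
  !(skip.toList.contains (Char.ofNat (i + 97).toNat))

-- n = sum(1 for i in range(26) if allowed(i))
def pvN (skip : String) : Int :=
  (PySem.List.pyRange 0 26 1).foldl (fun acc i => if pvAllowed skip i then acc + 1 else acc) 0

-- rank(c): scan range(26), returning the running count r when the allowed letter equals c;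
-- the Python raises KeyError when the scan is exhausted (unreachable under Pre_) — the port returns 0 there.
def pvRankScan (skip : String) (c : Char) (r : Int) : List Int → Int
  | [] => 0
  | i :: rest =>
      if pvAllowed skip i then
        if Char.ofNat (i + 97).toNat == c then r else pvRankScan skip c (r + 1) rest
      else pvRankScan skip c r rest

def pvRank (skip : String) (c : Char) : Int :=
  pvRankScan skip c 0 (PySem.List.pyRange 0 26 1)

-- unrank(r): scan range(26), decrementing r at each allowed letter; the Python returns None
-- when the scan is exhausted (unreachable under Pre_) — the port returns 'a' there.
def pvUnrank (skip : String) (r : Int) : List Int → Char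
  | [] => 'a'
  | i :: rest =>
      if pvAllowed skip i then
        if r == 0 then Char.ofNat (i + 97).toNat else pvUnrank skip (r - 1) rest
      else pvUnrank skip r rest

def solution_alt (s : String) (skip : String) (index : Int) : String :=
  let n := pvN skip
  String.ofList (s.toList.map (fun c =>
    pvUnrank skip (PySem.Int.mod (pvRank skip c + index) n) (PySem.List.pyRange 0 26 1)))

-- ===== PRECONDITION & SPEC =====
-- Pre_ excludes exactly the inputs on which A raises: a character of s that is not a
-- non-skipped lowercase letter raises KeyError (and, with every letter skipped and s nonempty,
-- ZeroDivisionError).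
def Pre_solution (s : String) (skip : String) (index : Int) : Prop :=
  (s.toList.all (fun c => 97 ≤ c.toNat && c.toNat ≤ 122 && !(skip.toList.contains c))) = true
instance (s : String) (skip : String) (index : Int) : Decidable (Pre_solution s skip index) := by
  unfold Pre_solution; infer_instance
def pvWitness_solution : String × String × Int := ("ab", "c", 5)

def Spec_solution (s : String) (skip : String) (index : Int) (out : String) : Prop := out = solution_alt s skip index
instance (s : String) (skip : String) (index : Int) (out : String) : Decidable (Spec_solution s skip index out) := by unfold Spec_solution; infer_instance

-- ===== CLAIM (what is proved, stated in full; the proofs are below) =====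
def Claim_equal_solution : Prop := ∀ (s : String) (skip : String) (index : Int), Dom_solution s skip index → Pre_solution s skip index → Spec_solution s skip index (solution s skip index)

-- ===== LEMMAS AND PROOFS =====

-- the allowed alphabet as A builds it
def pvRem (skip : String) : List Char :=
  ((PySem.List.pyRange 0 26 1).filter (pvAllowed skip)).map (fun i => Char.ofNat (i + 97).toNat)

theorem remA_eq (skip : String) :
    (PySem.List.pyRange 0 26 1).foldl (fun acc i =>
      let char := Char.ofNat (i + 97).toNat
      if !(skip.toList.contains char) then acc ++ [char] else acc) [] = pvRem skip := by
  show (PySem.List.pyRange 0 26 1).foldl (fun acc i =>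
      if (fun c => !(skip.toList.contains c)) ((fun i : Int => Char.ofNat (i + 97).toNat) i) then
        acc ++ [(fun i : Int => Char.ofNat (i + 97).toNat) i] else acc) [] = pvRem skip
  rw [PySem.List.foldl_append_if, List.nil_append]
  rfl

theorem chr_inj_on_range (i j : Int) (hi : 0 ≤ i) (hi' : i < 26) (hj : 0 ≤ j) (hj' : j < 26)
    (h : Char.ofNat (i + 97).toNat = Char.ofNat (j + 97).toNat) : i = j := by
  have h' := congrArg Char.toNat h
  rw [Char.toNat_ofNat, Char.toNat_ofNat] at h'
  simp only [Nat.isValidChar] at h'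
  rw [if_pos (by omega), if_pos (by omega)] at h'
  omega

theorem nodup_pvRem (skip : String) : (pvRem skip).Nodup := by
  apply List.Nodup.map_on ?_ ((PySem.List.nodup_pyRange_one 0 26).filter _)
  intro i hi j hj h
  have hi' := (PySem.List.mem_pyRange_one).mp (List.mem_of_mem_filter hi)
  have hj' := (PySem.List.mem_pyRange_one).mp (List.mem_of_mem_filter hj)
  exact chr_inj_on_range i j hi'.1 hi'.2 hj'.1 hj'.2 h

theorem mem_pvRem (skip : String) (c : Char) :
    c ∈ pvRem skip ↔ 97 ≤ c.toNat ∧ c.toNat ≤ 122 ∧ skip.toList.contains c = false := by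
  simp only [pvRem, List.mem_map, List.mem_filter, PySem.List.mem_pyRange_one]
  constructor
  · rintro ⟨i, ⟨⟨h1, h2⟩, ha⟩, rfl⟩
    rw [Char.toNat_ofNat, if_pos (by simp only [Nat.isValidChar]; omega)]
    refine ⟨by omega, by omega, ?_⟩
    simpa [pvAllowed] using ha
  · rintro ⟨h1, h2, hc⟩
    refine ⟨(c.toNat : Int) - 97, ⟨⟨by omega, by omega⟩, ?_⟩, ?_⟩
    · simp only [pvAllowed]
      rw [show ((c.toNat : Int) - 97 + 97) = (c.toNat : Int) by ring]
      simpa [Char.ofNat_toNat] using hc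
    · rw [show ((c.toNat : Int) - 97 + 97) = (c.toNat : Int) by ring]
      simp [Char.ofNat_toNat]

-- A's dict lookup is the index in remains
theorem getD_enumFold (l : List Char) : ∀ (s0 : Int) (d : PySem.Dict Char Int) (c : Char),
    l.Nodup →
    ((PySem.List.enumerate l s0).foldl (fun d p => d.insert p.2 p.1) d).getD c 0 =
      if c ∈ l then s0 + l.idxOf c else d.getD c 0 := by
  induction l with
  | nil => intro s0 d c _; simp [PySem.List.enumerate]
  | cons x xs ih =>
    intro s0 d c hnd
    rw [PySem.List.enumerate_cons, List.foldl_cons,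
      ih (s0 + 1) _ c (List.Nodup.of_cons hnd)]
    by_cases hx : c = x
    · subst hx
      have hcx : c ∉ xs := (List.nodup_cons.mp hnd).1
      simp [hcx]
    · by_cases hmem : c ∈ xs
      · simp only [if_pos hmem, if_pos (List.mem_cons_of_mem x hmem)]
        rw [List.idxOf_cons_ne _ (by simpa using Ne.symm hx)]
        push_cast; ring
      · simp [hmem, hx, PySem.Dict.getD_insert, List.mem_cons]

-- B's n is the length of A's remains
theorem pvN_eq (skip : String) : pvN skip = ((pvRem skip).length : Int) := by
  rw [pvN, PySem.List.foldl_if_add_one, pvRem, List.length_map,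
    ← List.countP_eq_length_filter]
  simp

-- B's rank scan computes A's idxOf
theorem pvRankScan_eq (skip : String) (c : Char) : ∀ (l : List Int) (r : Int),
    c ∈ (l.filter (pvAllowed skip)).map (fun i => Char.ofNat (i + 97).toNat) →
    pvRankScan skip c r l =
      r + (((l.filter (pvAllowed skip)).map (fun i => Char.ofNat (i + 97).toNat)).idxOf c : Int) := by
  intro l
  induction l with
  | nil => intro r h; simp at h
  | cons i rest ih =>
    intro r hmem
    by_cases ha : pvAllowed skip i
    · rw [List.filter_cons_of_pos ha, List.map_cons] at hmem ⊢
      rw [pvRankScan, if_pos ha]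
      by_cases he : Char.ofNat (i + 97).toNat = c
      · rw [if_pos (by simpa using he), he, List.idxOf_cons_self]
        simp
      · rw [if_neg (by simpa using he)]
        have hmem' : c ∈ (rest.filter (pvAllowed skip)).map
            (fun i => Char.ofNat (i + 97).toNat) := by
          rcases List.mem_cons.mp hmem with h | h
          · exact absurd h.symm he
          · exact h
        rw [ih (r + 1) hmem', List.idxOf_cons_ne _ (by simpa using he)]
        push_cast; ring
    · rw [List.filter_cons_of_neg ha] at hmem ⊢
      rw [pvRankScan, if_neg ha]
      exact ih r hmem

theorem pvRank_eq (skip : String) (c : Char) (hc : c ∈ pvRem skip) :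
    pvRank skip c = ((pvRem skip).idxOf c : Int) := by
  rw [pvRank, pvRankScan_eq skip c _ 0 (by exact hc), Int.zero_add]
  rfl

-- B's unrank reads the filtered-mapped alphabet at index r
theorem pvUnrank_eq (skip : String) : ∀ (l : List Int) (r : Int), 0 ≤ r →
    r < (((l.filter (pvAllowed skip)).length : Int)) →
    pvUnrank skip r l =
      ((l.filter (pvAllowed skip)).map (fun i => Char.ofNat (i + 97).toNat)).getD r.toNat 'a' := by
  intro l
  induction l with
  | nil => intro r hr h; simp at h; omega
  | cons i rest ih =>
    intro r hr0 hrlt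
    by_cases ha : pvAllowed skip i
    · rw [List.filter_cons_of_pos ha, List.map_cons]
      rw [pvUnrank, if_pos ha]
      by_cases hz : r = 0
      · subst hz; simp
      · rw [if_neg (by simpa using hz)]
        rw [List.filter_cons_of_pos ha] at hrlt
        rw [ih (r - 1) (by omega) (by push_cast [List.length_cons] at hrlt ⊢; omega)]
        have ht : r.toNat = (r - 1).toNat + 1 := by omega
        rw [ht, List.getD_cons_succ]
    · rw [List.filter_cons_of_neg ha, pvUnrank, if_neg ha]
      rw [List.filter_cons_of_neg ha] at hrlt
      exact ih r hr0 hrlt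

-- ===== VERDICT (by name: the statement is the Claim_ definition above) =====
theorem solution_spec : Claim_equal_solution := by
  intro s skip index _ hpre
  unfold Spec_solution
  simp only [solution, solution_alt]
  rw [remA_eq, PySem.List.foldl_append_singleton_eq_map, List.nil_append]
  congr 1
  apply List.map_congr_left
  intro c hc
  have hpre' := List.all_eq_true.mp hpre c hc
  simp only [Bool.and_eq_true, decide_eq_true_eq, Bool.not_eq_true'] at hpre'
  obtain ⟨⟨h1, h2⟩, h3⟩ := hpre'
  have hcR : c ∈ pvRem skip := (mem_pvRem skip c).mpr ⟨h1, h2, h3⟩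
  have hn : 0 < (pvRem skip).length := List.length_pos_of_mem hcR
  have hL : (0:Int) < ((pvRem skip).length : Int) := by exact_mod_cast hn
  rw [getD_enumFold (pvRem skip) 0 _ c (nodup_pvRem skip), if_pos hcR,
    pvN_eq, pvRank_eq skip c hcR, Int.zero_add]
  set m : Int := PySem.Int.mod (((pvRem skip).idxOf c : Int) + index) ((pvRem skip).length : Int)
    with hm
  have hm0 : 0 ≤ m := PySem.Int.mod_nonneg _ hL
  have hmlt : m < ((pvRem skip).length : Int) := PySem.Int.mod_lt _ hL
  rw [PySem.List.pyGetD_eq_getElem _ 'a' hm0 (by simpa using hmlt)]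
  rw [pvUnrank_eq skip _ m hm0 (by simpa [pvRem, List.length_map] using hmlt)]
  rw [← pvRem, List.getD_eq_getElem]
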